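-- pv_equiv track=rewrite | github.com/rdvncebecii/alpcan | backend/app/api/v1/dicom.py | _parse_age
-- ===== SOURCE A (Python) =====
-- def _parse_age(age_str: str) -> int | None:
--     """DICOM PatientAge → integer (örn: '045Y' → 45)."""
--     if not age_str:
--         return None
--     try:
--         digits = "".join(c for c in age_str if c.isdigit())
--         if digits:
--             return int(digits)
--     except (ValueError, TypeError):
--         pass
--     return None
-- ===== SOURCE B (Python) =====
-- def _parse_age(age_str: str) -> int | None:
--     """DICOM PatientAge -> integer, by direct digit accumulation in one pass
--     (no intermediate digit string, no int() on a built string)."""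
--     num = 0
--     found = False
--     for c in age_str:
--         if c.isdigit():
--             num = num * 10 + int(c)
--             found = True
--     return num if found else None
-- ===== Notes on version B (the rewrite author's own statement) =====
-- stated objective: simpler
-- what changed: Replaces the build-a-digit-string-then-int() decomposition with a single pass that folds each digit directly into an integer accumulator (num = num*10 + digit) with a found flag, so no intermediate string is built and int() never re-parses a built string.
import Mathlib
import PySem

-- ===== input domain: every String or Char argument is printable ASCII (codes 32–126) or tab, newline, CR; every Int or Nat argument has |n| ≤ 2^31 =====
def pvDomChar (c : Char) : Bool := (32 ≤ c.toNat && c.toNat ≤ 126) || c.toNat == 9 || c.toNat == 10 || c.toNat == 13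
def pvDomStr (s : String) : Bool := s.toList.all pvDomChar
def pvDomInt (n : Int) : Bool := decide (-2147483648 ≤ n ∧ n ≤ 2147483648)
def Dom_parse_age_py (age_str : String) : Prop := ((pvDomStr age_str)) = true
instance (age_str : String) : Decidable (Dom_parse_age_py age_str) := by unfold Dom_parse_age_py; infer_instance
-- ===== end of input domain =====

-- B replaces A's filter-digits-into-a-string-then-int() decomposition with a single pass that
-- folds each digit directly into an integer accumulator with a found flag (objective: simpler).


-- ===== PORT A =====
-- int(digits): `digits` is produced by the isdigit filter, so it is empty (guarded by the branch)
-- or consists only of '0'-'9'; Python's int() on such a nonempty string is exact decimal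
-- accumulation, hand-ported here (exact on this all-digits input: the whitespace/sign/underscore
-- handling of the general int() built-in is unreachable, and no ValueError can occur).
def pvIntOfDigits (ds : List Char) : Int :=
  ds.foldl (fun a c => a * 10 + ((c.toNat : Int) - 48)) 0

def parse_age_py (age_str : String) : Option Int :=
  if age_str.toList = [] then none          -- `if not age_str: return None`
  else
    let digits : List Char := age_str.toList.filter (fun c => PySem.Chars.isdigit c)
    if digits = [] then none                -- `if digits: return int(digits)` … `return None`
    else some (pvIntOfDigits digits)

-- ===== PORT B =====
def parse_age_py_alt (age_str : String) : Option Int :=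
  let r := age_str.toList.foldl
    (fun (acc : Bool × Int) c =>
      if PySem.Chars.isdigit c then (true, acc.2 * 10 + ((c.toNat : Int) - 48)) else acc)
    (false, 0)
  if r.1 then some r.2 else none

-- ===== PRECONDITION & SPEC =====
def Spec_parse_age_py (age_str : String) (out : Option Int) : Prop := out = parse_age_py_alt age_str
instance (age_str : String) (out : Option Int) : Decidable (Spec_parse_age_py age_str out) := by unfold Spec_parse_age_py; infer_instance

-- ===== CLAIM (what is proved, stated in full; the proofs are below) =====
def Claim_equal_parse_age_py : Prop := ∀ (age_str : String), Dom_parse_age_py age_str → Spec_parse_age_py age_str (parse_age_py age_str)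

-- ===== LEMMAS AND PROOFS =====

-- B's fold over the whole string equals (was any digit seen, A's accumulation over the filtered digits).
lemma pv_fold_eq (cs : List Char) (b : Bool) (n : Int) :
    cs.foldl
      (fun (acc : Bool × Int) c =>
        if PySem.Chars.isdigit c then (true, acc.2 * 10 + ((c.toNat : Int) - 48)) else acc)
      (b, n)
    = (b || !(cs.filter (fun c => PySem.Chars.isdigit c)).isEmpty,
       (cs.filter (fun c => PySem.Chars.isdigit c)).foldl
         (fun a c => a * 10 + ((c.toNat : Int) - 48)) n) := by
  induction cs generalizing b n with
  | nil => simp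
  | cons c cs ih =>
    by_cases h : PySem.Chars.isdigit c
    · simp [List.foldl_cons, h, ih]
    · simp [List.foldl_cons, h, ih]

-- ===== VERDICT (by name: the statement is the Claim_ definition above) =====
theorem parse_age_py_spec : Claim_equal_parse_age_py := by
  intro age_str _
  unfold Spec_parse_age_py parse_age_py parse_age_py_alt pvIntOfDigits
  rw [pv_fold_eq]
  rcases hcs : age_str.toList with _ | ⟨c, cs⟩
  · simp
  · simp only [Bool.false_or, reduceIte]
    by_cases hd : ((c :: cs).filter (fun c => PySem.Chars.isdigit c)).isEmpty
    · simp_all [List.isEmpty_iff]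
    · simp_all [List.isEmpty_iff]
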